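-- pv_equiv track=rewrite | github.com/kevilgs/AI-Calculator | routes/user_routes.py | sanitize_html_tags
-- ===== SOURCE A (Python) =====
-- def sanitize_html_tags(text):
--     """
--     Sanitize and balance HTML tags in text to ensure proper rendering.
--     This fixes issues with incorrect tag nesting or mismatched tags.
--     """
--     # Remove any existing HTML tags first
--     clean_text = text.replace('<b>', '**').replace('</b>', '**')
--     clean_text = clean_text.replace('<i>', '*').replace('</i>', '*')
--     clean_text = clean_text.replace('<em>', '*').replace('</em>', '*')
--     clean_text = clean_text.replace('<strong>', '**').replace('</strong>', '**')
--
--     # Now re-process with a better tag balancing approach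
--     result = ""
--     bold_open = False
--     italic_open = False
--
--     # Re-process markdown-style formatting
--     i = 0
--     while i < len(clean_text):
--         # Handle bold formatting
--         if i < len(clean_text) - 1 and clean_text[i:i+2] == '**':
--             if not bold_open:
--                 result += '<b>'
--                 bold_open = True
--             else:
--                 result += '</b>'
--                 bold_open = False
--             i += 2
--         # Handle italic formatting
--         elif clean_text[i] == '*':
--             if not italic_open:
--                 result += '<i>'
--                 italic_open = True
--             else:
--                 result += '</i>'
--                 italic_open = False
--             i += 1
--         else:
--             result += clean_text[i]
--             i += 1
--
--     # Ensure all tags are closed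
--     if bold_open:
--         result += '</b>'
--     if italic_open:
--         result += '</i>'
--
--     return result
-- ===== SOURCE B (Python) =====
-- def sanitize_html_tags(text):
--     # Same normalization as the original.
--     clean_text = text.replace('<b>', '**').replace('</b>', '**')
--     clean_text = clean_text.replace('<i>', '*').replace('</i>', '*')
--     clean_text = clean_text.replace('<em>', '*').replace('</em>', '*')
--     clean_text = clean_text.replace('<strong>', '**').replace('</strong>', '**')
--
--     # Run-length approach: a run of k consecutive '*' contributes k//2 bold
--     # toggles followed by (k % 2) italic toggles.
--     out = []
--     bold = False
--     italic = False
--     run = 0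
--
--     def flush():
--         nonlocal bold, italic, run
--         for _ in range(run // 2):
--             out.append('</b>' if bold else '<b>')
--             bold = not bold
--         if run % 2:
--             out.append('</i>' if italic else '<i>')
--             italic = not italic
--         run = 0
--
--     for ch in clean_text:
--         if ch == '*':
--             run += 1
--         else:
--             flush()
--             out.append(ch)
--     flush()
--     if bold:
--         out.append('</b>')
--     if italic:
--         out.append('</i>')
--     return ''.join(out)
-- ===== Notes on version B (the rewrite author's own statement) =====
-- stated objective: faster
-- what changed: Replaces A's index-based scan with two-character lookahead and repeated string concatenation by a single run-length pass that counts each maximal asterisk run, emits run//2 bold toggles plus a parity italic toggle per flush, and joins the collected pieces once.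
import Mathlib
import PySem

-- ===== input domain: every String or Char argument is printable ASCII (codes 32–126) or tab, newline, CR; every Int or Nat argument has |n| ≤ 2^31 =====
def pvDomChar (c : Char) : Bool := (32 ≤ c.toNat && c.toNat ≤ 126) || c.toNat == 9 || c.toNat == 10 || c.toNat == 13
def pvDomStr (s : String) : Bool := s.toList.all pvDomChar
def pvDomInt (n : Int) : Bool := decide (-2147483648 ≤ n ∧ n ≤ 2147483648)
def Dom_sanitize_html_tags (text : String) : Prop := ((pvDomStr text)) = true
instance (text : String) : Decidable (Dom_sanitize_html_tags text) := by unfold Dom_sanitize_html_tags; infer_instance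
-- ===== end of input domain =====

-- B replaces A's index scan with two-char lookahead by a run-length pass: it counts each
-- and joins collected pieces once instead of repeated string concatenation (objective: faster, measured).


-- ===== PORT A =====
-- the replace normalization chain shared by both Pythons
def pvClean (text : String) : String :=
  let c1 := PySem.Str.replace (PySem.Str.replace text "<b>" "**") "</b>" "**"
  let c2 := PySem.Str.replace (PySem.Str.replace c1 "<i>" "*") "</i>" "*"
  let c3 := PySem.Str.replace (PySem.Str.replace c2 "<em>" "*") "</em>" "*"
  PySem.Str.replace (PySem.Str.replace c3 "<strong>" "**") "</strong>" "**"

-- A's while loop: check for '**' at i (needs i < len-1), else single '*', else copy char;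
-- the two trailing closes after the loop are emitted in the [] case.
def pvLoopA : List Char → Bool → Bool → List Char
  | [], b, i =>
      (if b then "</b>".toList else []) ++ (if i then "</i>".toList else [])
  | c :: rest, b, i =>
      if c = '*' then
        match rest with
        | d :: rest2 =>
            if d = '*' then
              (if b then "</b>".toList else "<b>".toList) ++ pvLoopA rest2 (!b) i
            else
              (if i then "</i>".toList else "<i>".toList) ++ pvLoopA (d :: rest2) b (!i)
        | [] =>
            (if i then "</i>".toList else "<i>".toList) ++ pvLoopA [] b (!i)
      else c :: pvLoopA rest b i

def sanitize_html_tags (text : String) : String :=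
  String.ofList (pvLoopA (pvClean text).toList false false)

-- ===== PORT B =====
-- n alternating toggle tags starting from state `b` (the 'for _ in range(...)' loop in flush)
def pvToggles : Nat → Bool → List Char → List Char → List Char × Bool
  | 0, b, _, _ => ([], b)
  | n + 1, b, ot, ct =>
      let r := pvToggles n (!b) ot ct
      ((if b then ct else ot) ++ r.1, r.2)

-- B's flush(): run/2 bold toggles, then run%2 italic toggles
def pvFlush (run : Nat) (b i : Bool) : List Char × Bool × Bool :=
  let rb := pvToggles (run / 2) b "<b>".toList "</b>".toList
  let ri := pvToggles (run % 2) i "<i>".toList "</i>".toList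
  (rb.1 ++ ri.1, rb.2, ri.2)

-- B's for-loop over characters, carrying the current star-run length
def pvLoopB : List Char → Nat → Bool → Bool → List Char
  | [], run, b, i =>
      let f := pvFlush run b i
      f.1 ++ (if f.2.1 then "</b>".toList else []) ++ (if f.2.2 then "</i>".toList else [])
  | c :: rest, run, b, i =>
      if c = '*' then pvLoopB rest (run + 1) b i
      else
        let f := pvFlush run b i
        f.1 ++ c :: pvLoopB rest 0 f.2.1 f.2.2

def sanitize_html_tags_alt (text : String) : String :=
  String.ofList (pvLoopB (pvClean text).toList 0 false false)

-- ===== PRECONDITION & SPEC =====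
def Spec_sanitize_html_tags (text : String) (out : String) : Prop := out = sanitize_html_tags_alt text
instance (text : String) (out : String) : Decidable (Spec_sanitize_html_tags text out) := by unfold Spec_sanitize_html_tags; infer_instance

-- ===== CLAIM (what is proved, stated in full; the proofs are below) =====
def Claim_equal_sanitize_html_tags : Prop := ∀ (text : String), Dom_sanitize_html_tags text → Spec_sanitize_html_tags text (sanitize_html_tags text)

-- ===== LEMMAS AND PROOFS =====

-- A on a run of `run` stars followed by a non-star (or end) = B's flush emission
theorem pvLoopA_star_run (run : Nat) (t : List Char) (b i : Bool)
    (ht : t = [] ∨ ∀ d t', t = d :: t' → d ≠ '*') :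
    pvLoopA (List.replicate run '*' ++ t) b i =
      (pvFlush run b i).1 ++ pvLoopA t (pvFlush run b i).2.1 (pvFlush run b i).2.2 := by
  induction run using Nat.strong_induction_on generalizing b i with
  | _ run IH =>
    match run with
    | 0 => simp [pvFlush, pvToggles]
    | 1 =>
      cases t with
      | nil => simp [pvLoopA, pvFlush, pvToggles]
      | cons d t' =>
        rcases ht with h | h
        · exact absurd h (by simp)
        · have hd : d ≠ '*' := h d t' rfl
          simp [pvLoopA, pvFlush, pvToggles, hd]
    | (n + 2) =>
      have hrep : List.replicate (n + 2) '*' ++ t = '*' :: '*' :: (List.replicate n '*' ++ t) := by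
        simp [List.replicate]
      have hdiv : (n + 2) / 2 = n / 2 + 1 := by omega
      have hmod : (n + 2) % 2 = n % 2 := by omega
      rw [hrep]
      have hstep : pvLoopA ('*' :: '*' :: (List.replicate n '*' ++ t)) b i =
          (if b then "</b>".toList else "<b>".toList) ++ pvLoopA (List.replicate n '*' ++ t) (!b) i := by
        simp [pvLoopA]
      rw [hstep, IH n (by omega) (!b) i]
      simp [pvFlush, hdiv, hmod, pvToggles, List.append_assoc]

-- main invariant: A on pending stars ++ t = B's loop with that pending run
theorem pvLoopA_eq_pvLoopB (t : List Char) (run : Nat) (b i : Bool) :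
    pvLoopA (List.replicate run '*' ++ t) b i = pvLoopB t run b i := by
  induction t generalizing run b i with
  | nil =>
    rw [pvLoopA_star_run run [] b i (Or.inl rfl)]
    simp [pvLoopA, pvLoopB]
  | cons c rest IH =>
    by_cases hc : c = '*'
    · subst hc
      have : List.replicate run '*' ++ '*' :: rest = List.replicate (run + 1) '*' ++ rest := by
        rw [List.replicate_succ']
        simp
      rw [this, IH (run + 1) b i]
      simp [pvLoopB]
    · rw [pvLoopA_star_run run (c :: rest) b i (Or.inr (by intro d t' h; cases h; exact hc))]
      have h2 : pvLoopA (c :: rest) (pvFlush run b i).2.1 (pvFlush run b i).2.2 =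
          c :: pvLoopA rest (pvFlush run b i).2.1 (pvFlush run b i).2.2 := by
        rw [pvLoopA.eq_def]; simp [hc]
      have h3 := IH 0 (pvFlush run b i).2.1 (pvFlush run b i).2.2
      simp only [List.replicate, List.nil_append] at h3
      rw [h2, h3]
      simp [pvLoopB, hc]

-- ===== VERDICT (by name: the statement is the Claim_ definition above) =====
theorem sanitize_html_tags_spec : Claim_equal_sanitize_html_tags := by
  intro text _
  unfold Spec_sanitize_html_tags sanitize_html_tags sanitize_html_tags_alt
  have h := pvLoopA_eq_pvLoopB (pvClean text).toList 0 false false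
  simp only [List.replicate, List.nil_append] at h
  rw [h]
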